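-- pv_equiv track=rewrite | github.com/MrGamesKingPro/CCFF7R-Tool-Localization | tools/csv_to_mbd_discimg.py | cut_str_sem
-- ===== SOURCE A (Python) =====
-- def cut_str_sem(strin):
--     cew, lj, cv, rt = [], '', '', False
--     for x in strin:
--         if x == '<' and not rt:
--             rt = True
--             if lj: cew.append(lj); lj = ''
--             cv += x
--         elif x == '>' and rt:
--             cv += x; cew.append(cv); cv = ''; rt = False
--         elif rt: cv += x
--         else: lj += x
--     if lj: cew.append(lj)
--     if cv: cew.append(cv)
--     return cew
-- ===== SOURCE B (Python) =====
-- def cut_str_sem(strin):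
--     out = []
--     i, n = 0, len(strin)
--     while i < n:
--         if strin[i] == '<':
--             k = strin.find('>', i)
--             if k == -1:
--                 out.append(strin[i:])
--                 break
--             out.append(strin[i:k + 1])
--             i = k + 1
--         else:
--             j = strin.find('<', i)
--             if j == -1:
--                 out.append(strin[i:])
--                 break
--             out.append(strin[i:j])
--             i = j
--     return out
-- ===== Notes on version B (the rewrite author's own statement) =====
-- stated objective: faster
-- what changed: Replaced A's character-by-character state machine (a flag plus two growing string accumulators) with an index-jumping chunk scanner that uses str.find to locate the next bracket and slices whole tokens out at once.
import Mathlib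
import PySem

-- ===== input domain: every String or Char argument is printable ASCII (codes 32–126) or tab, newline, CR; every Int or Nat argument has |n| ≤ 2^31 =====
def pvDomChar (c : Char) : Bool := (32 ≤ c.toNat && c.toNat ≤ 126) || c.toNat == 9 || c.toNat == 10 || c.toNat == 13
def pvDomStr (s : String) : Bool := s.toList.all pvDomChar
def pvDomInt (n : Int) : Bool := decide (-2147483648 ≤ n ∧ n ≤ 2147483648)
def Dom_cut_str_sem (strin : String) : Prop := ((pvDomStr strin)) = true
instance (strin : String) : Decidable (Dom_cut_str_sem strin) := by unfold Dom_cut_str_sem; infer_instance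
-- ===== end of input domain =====

-- B replaces A's character-by-character state machine with a find/slice chunk scanner (a timing run measured B faster by a constant factor).

-- ===== PORT A =====
-- A's loop state: (cew, lj, cv, rt); strings accumulated as List Char, turned into String at the end.
def cutStep (st : List (List Char) × List Char × List Char × Bool) (x : Char) :
    List (List Char) × List Char × List Char × Bool :=
  let (cew, lj, cv, rt) := st
  if x = '<' ∧ rt = false then
    (if lj ≠ [] then cew ++ [lj] else cew, [], cv ++ [x], true)
  else if x = '>' ∧ rt = true then
    (cew ++ [cv ++ [x]], lj, [], false)
  else if rt then
    (cew, lj, cv ++ [x], rt)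
  else
    (cew, lj ++ [x], cv, rt)

def cutFin (st : List (List Char) × List Char × List Char × Bool) : List (List Char) :=
  let (cew, lj, cv, _) := st
  (cew ++ (if lj ≠ [] then [lj] else [])) ++ (if cv ≠ [] then [cv] else [])

def cut_str_sem (strin : String) : List String :=
  (cutFin (strin.toList.foldl cutStep ([], [], [], false))).map String.ofList

-- ===== PORT B =====
-- Source B's while loop over index i, ported as recursion on the suffix strin[i:].
-- strin.find('>', i) with strin[i] = '<' ≠ '>' is exactly the search over the tail:
-- takeWhile is the slice up to the found position, dropWhile its remainder; find = -1 ↔ dropWhile = [].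
def cutGo : List Char → List (List Char)
  | [] => []
  | c :: cs =>
    if c = '<' then
      match h : cs.dropWhile (· ≠ '>') with
      | [] => [c :: cs]                                   -- k == -1: emit strin[i:], stop
      | _ :: r => (c :: cs.takeWhile (· ≠ '>') ++ ['>']) :: cutGo r   -- emit strin[i:k+1], i = k+1
    else
      match h : cs.dropWhile (· ≠ '<') with
      | [] => [c :: cs]                                   -- j == -1: emit strin[i:], stop
      | d :: q => (c :: cs.takeWhile (· ≠ '<')) :: cutGo (d :: q)     -- emit strin[i:j], i = j
  termination_by s => s.length
  decreasing_by
  · have := List.length_dropWhile_le (p := (· ≠ '>')) (l := cs); rw [h] at this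
    simp at this ⊢; omega
  · have := List.length_dropWhile_le (p := (· ≠ '<')) (l := cs); rw [h] at this
    simp at this ⊢; omega

def cut_str_sem_alt (strin : String) : List String :=
  (cutGo strin.toList).map String.ofList

-- ===== PRECONDITION & SPEC =====
def Spec_cut_str_sem (strin : String) (out : List String) : Prop := out = cut_str_sem_alt strin
instance (strin : String) (out : List String) : Decidable (Spec_cut_str_sem strin out) := by unfold Spec_cut_str_sem; infer_instance

-- ===== CLAIM (what is proved, stated in full; the proofs are below) =====
def Claim_equal_cut_str_sem : Prop := ∀ (strin : String), Dom_cut_str_sem strin → Spec_cut_str_sem strin (cut_str_sem strin)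

-- ===== LEMMAS AND PROOFS =====

-- closed form of A's fold: tokens still to be emitted from state (lj, cv, rt) on remaining input s
def cutRes (lj cv : List Char) (rt : Bool) : List Char → List (List Char)
  | [] => (if lj ≠ [] then [lj] else []) ++ (if cv ≠ [] then [cv] else [])
  | x :: s =>
    if x = '<' ∧ rt = false then
      (if lj ≠ [] then [lj] else []) ++ cutRes [] (cv ++ [x]) true s
    else if x = '>' ∧ rt = true then
      (cv ++ [x]) :: cutRes lj [] false s
    else if rt then
      cutRes lj (cv ++ [x]) rt s
    else
      cutRes (lj ++ [x]) cv rt s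

theorem cutFin_foldl (s : List Char) : ∀ cew lj cv rt,
    cutFin (s.foldl cutStep (cew, lj, cv, rt)) = cew ++ cutRes lj cv rt s := by
  induction s with
  | nil => intro cew lj cv rt; simp [cutFin, cutRes]
  | cons x s ih =>
    intro cew lj cv rt
    simp only [List.foldl_cons, cutStep, cutRes]
    split_ifs with h1 h2 h3 <;> simp [ih, List.append_assoc]

-- B-side tag scanner: collect into cv until '>' (A's rt = true state)
def cutT (cv : List Char) : List Char → List (List Char)
  | [] => [cv]
  | x :: s => if x = '>' then (cv ++ ['>']) :: cutGo s else cutT (cv ++ [x]) s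

-- B-side plain scanner: collect into lj until '<' (A's rt = false state)
def cutP (lj : List Char) : List Char → List (List Char)
  | [] => if lj ≠ [] then [lj] else []
  | x :: s => if x = '<' then (if lj ≠ [] then [lj] else []) ++ cutT ['<'] s else cutP (lj ++ [x]) s

theorem cutT_spec (s : List Char) : ∀ cv, cutT cv s =
    match s.dropWhile (· ≠ '>') with
    | [] => [cv ++ s]
    | _ :: r => (cv ++ s.takeWhile (· ≠ '>') ++ ['>']) :: cutGo r := by
  induction s with
  | nil => intro cv; simp [cutT]
  | cons x s ih =>
    intro cv
    by_cases hx : x = '>'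
    · subst hx; simp [cutT, List.dropWhile, List.takeWhile]
    · simp only [cutT, if_neg hx, ih]
      have hx' : ((· ≠ '>') x) = true := by simp [hx]
      simp only [List.dropWhile_cons, List.takeWhile_cons, hx']
      cases hd : s.dropWhile (· ≠ '>') <;> simp

theorem cutP_spec (s : List Char) : ∀ lj, cutP lj s =
    match s.dropWhile (· ≠ '<') with
    | [] => if lj ++ s ≠ [] then [lj ++ s] else []
    | _ :: r => (if lj ++ s.takeWhile (· ≠ '<') ≠ [] then [lj ++ s.takeWhile (· ≠ '<')] else []) ++ cutT ['<'] r := by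
  induction s with
  | nil => intro lj; simp [cutP]
  | cons x s ih =>
    intro lj
    by_cases hx : x = '<'
    · subst hx; simp [cutP, List.dropWhile, List.takeWhile]
    · simp only [cutP, if_neg hx, ih]
      have hx' : ((· ≠ '<') x) = true := by simp [hx]
      simp only [List.dropWhile_cons, List.takeWhile_cons, hx']
      cases hd : s.dropWhile (· ≠ '<') <;> simp [List.append_assoc]

theorem cutGo_lt (q : List Char) : cutGo ('<' :: q) = cutT ['<'] q := by
  rw [cutGo, if_pos rfl]
  split <;> rename_i h <;> rw [cutT_spec, h] <;> simp

theorem dropWhile_lt_head {l : List Char} {d : Char} {q : List Char}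
    (h : List.dropWhile (fun x => decide (x ≠ '<')) l = d :: q) : d = '<' := by
  induction l with
  | nil => simp at h
  | cons y l ih =>
    rw [List.dropWhile_cons] at h
    split at h
    · exact ih h
    · rename_i hy
      injection h with h1 _
      subst h1
      simpa using hy

theorem cutGo_eq_cutP : ∀ s : List Char, cutGo s = cutP [] s := by
  intro s
  cases s with
  | nil => rw [cutGo, cutP]; simp
  | cons c cs =>
    by_cases hc : c = '<'
    · subst hc
      rw [cutGo_lt]
      simp [cutP]
    · rw [cutGo, if_neg hc]
      split <;> rename_i h
      · simp only [cutP, if_neg hc, List.nil_append]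
        rw [cutP_spec, h]
        simp
      · rename_i d q
        have hdlt : d = '<' := dropWhile_lt_head h
        subst hdlt
        rw [cutGo_lt]
        simp only [cutP, if_neg hc, List.nil_append]
        rw [cutP_spec, h]
        simp

theorem cutRes_eq (s : List Char) :
    (∀ lj, cutRes lj [] false s = cutP lj s) ∧ (∀ cv, cv ≠ [] → cutRes [] cv true s = cutT cv s) := by
  induction s with
  | nil =>
    constructor
    · intro lj; simp [cutRes, cutP]
    · intro cv hcv; simp [cutRes, cutT, hcv]
  | cons x s ih =>
    constructor
    · intro lj
      by_cases hx : x = '<'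
      · subst hx
        simp only [cutRes, cutP]
        simp [ih.2 ['<'] (by simp)]
      · simp [cutRes, cutP, hx, ih.1]
    · intro cv hcv
      by_cases hx : x = '>'
      · subst hx
        simp only [cutRes, cutT]
        simp [ih.1, cutGo_eq_cutP]
      · simp only [cutRes, cutT]
        simp [hx, ih.2 (cv ++ [x]) (by simp)]

-- ===== VERDICT (by name: the statement is the Claim_ definition above) =====
theorem cut_str_sem_spec : Claim_equal_cut_str_sem := by
  intro strin _
  unfold Spec_cut_str_sem cut_str_sem cut_str_sem_alt
  rw [cutFin_foldl, (cutRes_eq strin.toList).1, ← cutGo_eq_cutP]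
  simp
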